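-- pv_equiv track=rewrite | github.com/MN03SGO/GafasIA | src/controladores/gestor_principal.py | _calcular_prioridad_mensaje
-- ===== SOURCE A (Python) =====
-- from typing import Dict, List, Optional, Tuple, Any
--
-- def _calcular_prioridad_mensaje(detecciones: List[Dict]) -> int:
--     # Prioridad 1 (alta): objetos muy cerca o peligrosos
--     objetos_peligrosos = ['car', 'truck', 'bus', 'motorcycle', 'bicycle']
--     for det in detecciones:
--         clase = det.get('clase', '')
--         distancia = det.get('distancia_relativa', 'media')
--         # Muy alta prioridad para objetos cercanos o peligrosos
--         if distancia == 'muy_cerca' or clase in objetos_peligrosos: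
--             return 1
--     # Prioridad 2 (media): objetos cercanos
--     for det in detecciones:
--         if det.get('distancia_relativa') == 'cerca':
--             return 2
--     # Prioridad 3 (baja): otros objetos
--     return 3
-- ===== SOURCE B (Python) =====
-- def _calcular_prioridad_mensaje(detecciones):
--     peligrosos = {'car', 'truck', 'bus', 'motorcycle', 'bicycle'}
--
--     def prioridad(det):
--         if det.get('distancia_relativa') == 'muy_cerca' or det.get('clase', '') in peligrosos:
--             return 1
--         if det.get('distancia_relativa') == 'cerca':
--             return 2
--         return 3
--
--     return min(map(prioridad, detecciones), default=3)
-- ===== Notes on version B (the rewrite author's own statement) =====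
-- stated objective: simpler
-- what changed: Replaced the two sequential early-returning scans with a single map-then-reduce: each detection gets a per-detection priority (1/2/3) and the result is min over them with default 3.
import Mathlib
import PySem

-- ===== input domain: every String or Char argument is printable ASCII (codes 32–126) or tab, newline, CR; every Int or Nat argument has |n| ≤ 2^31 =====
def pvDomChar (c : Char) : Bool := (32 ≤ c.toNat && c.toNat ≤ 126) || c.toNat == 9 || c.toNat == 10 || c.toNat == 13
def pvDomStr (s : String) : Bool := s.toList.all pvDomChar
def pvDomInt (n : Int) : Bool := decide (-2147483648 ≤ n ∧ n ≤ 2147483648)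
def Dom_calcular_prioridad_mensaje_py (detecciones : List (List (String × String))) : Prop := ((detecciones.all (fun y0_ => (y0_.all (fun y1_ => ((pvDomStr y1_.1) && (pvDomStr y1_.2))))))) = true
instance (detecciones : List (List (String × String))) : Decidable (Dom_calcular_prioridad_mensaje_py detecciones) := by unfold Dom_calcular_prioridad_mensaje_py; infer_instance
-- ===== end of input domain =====

-- B replaces A's two sequential early-returning scans by one map-then-min reduction (per-detection priority, min with default 3): simpler decomposition, same cost.


-- ===== PORT A =====
def pvPeligrosos : List String := ["car", "truck", "bus", "motorcycle", "bicycle"]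

-- first loop: return 1 on a muy_cerca/dangerous detection
def pvA_loop1 : List (List (String × String)) → Option Int
  | [] => none
  | det :: rest =>
    let clase := PySem.Dict.getD (PySem.Dict.mk det) "clase" ""
    let distancia := PySem.Dict.getD (PySem.Dict.mk det) "distancia_relativa" "media"
    if distancia = "muy_cerca" ∨ pvPeligrosos.contains clase then some 1 else pvA_loop1 rest

-- second loop: return 2 on a cerca detection
def pvA_loop2 : List (List (String × String)) → Option Int
  | [] => none
  | det :: rest =>
    if PySem.Dict.get? (PySem.Dict.mk det) "distancia_relativa" = some "cerca" then some 2
    else pvA_loop2 rest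

def calcular_prioridad_mensaje_py (detecciones : List (List (String × String))) : Int :=
  match pvA_loop1 detecciones with
  | some v => v
  | none =>
    match pvA_loop2 detecciones with
    | some v => v
    | none => 3

-- ===== PORT B =====
def pvPrioridad (det : List (String × String)) : Int :=
  if PySem.Dict.get? (PySem.Dict.mk det) "distancia_relativa" = some "muy_cerca"
      ∨ pvPeligrosos.contains (PySem.Dict.getD (PySem.Dict.mk det) "clase" "") then 1
  else if PySem.Dict.get? (PySem.Dict.mk det) "distancia_relativa" = some "cerca" then 2
  else 3

-- min(map(prioridad, detecciones), default=3)
def calcular_prioridad_mensaje_py_alt (detecciones : List (List (String × String))) : Int :=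
  match detecciones.map pvPrioridad with
  | [] => 3
  | x :: xs => xs.foldl min x

-- ===== PRECONDITION & SPEC =====
def Spec_calcular_prioridad_mensaje_py (detecciones : List (List (String × String))) (out : Int) : Prop := out = calcular_prioridad_mensaje_py_alt detecciones
instance (detecciones : List (List (String × String))) (out : Int) : Decidable (Spec_calcular_prioridad_mensaje_py detecciones out) := by unfold Spec_calcular_prioridad_mensaje_py; infer_instance

-- ===== CLAIM (what is proved, stated in full; the proofs are below) =====
def Claim_equal_calcular_prioridad_mensaje_py : Prop := ∀ (detecciones : List (List (String × String))), Dom_calcular_prioridad_mensaje_py detecciones → Spec_calcular_prioridad_mensaje_py detecciones (calcular_prioridad_mensaje_py detecciones)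

-- ===== LEMMAS AND PROOFS =====

theorem pvA_loop1_cons (det : List (String × String)) (rest : List (List (String × String))) :
    pvA_loop1 (det :: rest)
      = if PySem.Dict.getD (PySem.Dict.mk det) "distancia_relativa" "media" = "muy_cerca"
            ∨ pvPeligrosos.contains (PySem.Dict.getD (PySem.Dict.mk det) "clase" "") then some 1
        else pvA_loop1 rest := rfl

theorem pvA_loop2_cons (det : List (String × String)) (rest : List (List (String × String))) :
    pvA_loop2 (det :: rest)
      = if PySem.Dict.get? (PySem.Dict.mk det) "distancia_relativa" = some "cerca" then some 2
        else pvA_loop2 rest := rfl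

theorem pvPrioridad_bounds (det : List (String × String)) :
    1 ≤ pvPrioridad det ∧ pvPrioridad det ≤ 3 := by
  unfold pvPrioridad; split_ifs <;> omega

theorem pvA_loop1_cases (l : List (List (String × String))) :
    pvA_loop1 l = none ∨ pvA_loop1 l = some 1 := by
  induction l with
  | nil => left; rfl
  | cons det rest ih =>
    rw [pvA_loop1_cons]
    split_ifs with h
    · right; rfl
    · exact ih

theorem pvA_loop2_cases (l : List (List (String × String))) :
    pvA_loop2 l = none ∨ pvA_loop2 l = some 2 := by
  induction l with
  | nil => left; rfl
  | cons det rest ih =>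
    rw [pvA_loop2_cons]
    split_ifs with h
    · right; rfl
    · exact ih

theorem pvA_bounds (l : List (List (String × String))) :
    1 ≤ calcular_prioridad_mensaje_py l ∧ calcular_prioridad_mensaje_py l ≤ 3 := by
  unfold calcular_prioridad_mensaje_py
  rcases pvA_loop1_cases l with h1 | h1 <;> rw [h1]
  · rcases pvA_loop2_cases l with h2 | h2 <;> rw [h2] <;> simp
  · simp

-- getD with a default that is not "muy_cerca" hits "muy_cerca" iff get? does
theorem pvGetD_muy_cerca (det : List (String × String)) :
    (PySem.Dict.getD (PySem.Dict.mk det) "distancia_relativa" "media" = "muy_cerca")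
      ↔ PySem.Dict.get? (PySem.Dict.mk det) "distancia_relativa" = some "muy_cerca" := by
  rw [PySem.Dict.getD_eq_get?_getD]
  cases h : PySem.Dict.get? (PySem.Dict.mk det) "distancia_relativa" <;> simp

-- B's min-fold peels one element
theorem pvB_cons (det : List (String × String)) (rest : List (List (String × String))) :
    calcular_prioridad_mensaje_py_alt (det :: rest)
      = min (pvPrioridad det) (calcular_prioridad_mensaje_py_alt rest) := by
  unfold calcular_prioridad_mensaje_py_alt
  cases rest with
  | nil =>
    simp [min_eq_left (pvPrioridad_bounds det).2]
  | cons y ys =>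
    simp only [List.map, List.foldl]
    rw [List.foldl_assoc]

-- A also peels one element as a min
theorem pvA_cons (det : List (String × String)) (rest : List (List (String × String))) :
    calcular_prioridad_mensaje_py (det :: rest)
      = min (pvPrioridad det) (calcular_prioridad_mensaje_py rest) := by
  by_cases h1 : PySem.Dict.getD (PySem.Dict.mk det) "distancia_relativa" "media" = "muy_cerca"
      ∨ pvPeligrosos.contains (PySem.Dict.getD (PySem.Dict.mk det) "clase" "")
  · have hp : pvPrioridad det = 1 := by
      unfold pvPrioridad
      rw [if_pos (by rw [← pvGetD_muy_cerca]; exact h1)]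
    have : calcular_prioridad_mensaje_py (det :: rest) = 1 := by
      unfold calcular_prioridad_mensaje_py
      rw [pvA_loop1_cons, if_pos h1]
    rw [this, hp, min_eq_left (pvA_bounds rest).1]
  · have hp : pvPrioridad det
        = if PySem.Dict.get? (PySem.Dict.mk det) "distancia_relativa" = some "cerca" then 2 else 3 := by
      unfold pvPrioridad
      rw [if_neg (by rw [← pvGetD_muy_cerca]; exact h1)]
    have hL1 : pvA_loop1 (det :: rest) = pvA_loop1 rest := by
      rw [pvA_loop1_cons, if_neg h1]
    rcases pvA_loop1_cases rest with hr | hr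
    · -- first loop finds nothing: A rest ∈ {2,3}, decided by loop 2
      by_cases hc : PySem.Dict.get? (PySem.Dict.mk det) "distancia_relativa" = some "cerca"
      · have : calcular_prioridad_mensaje_py (det :: rest) = 2 := by
          unfold calcular_prioridad_mensaje_py
          rw [hL1, hr, pvA_loop2_cons, if_pos hc]
        rw [this, hp, if_pos hc]
        have hge : 2 ≤ calcular_prioridad_mensaje_py rest := by
          unfold calcular_prioridad_mensaje_py
          rw [hr]
          rcases pvA_loop2_cases rest with h2 | h2 <;> rw [h2] <;> simp
        omega
      · have : calcular_prioridad_mensaje_py (det :: rest) = calcular_prioridad_mensaje_py rest := by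
          unfold calcular_prioridad_mensaje_py
          rw [hL1]
          cases hq : pvA_loop1 rest
          · rw [pvA_loop2_cons, if_neg hc]
          · rfl
        rw [this, hp, if_neg hc, min_eq_right (pvA_bounds rest).2]
    · -- first loop fires on rest: both sides are 1
      have hA : calcular_prioridad_mensaje_py rest = 1 := by
        unfold calcular_prioridad_mensaje_py; rw [hr]
      have : calcular_prioridad_mensaje_py (det :: rest) = 1 := by
        unfold calcular_prioridad_mensaje_py; rw [hL1, hr]
      rw [this, hA, min_eq_right (pvPrioridad_bounds det).1]

theorem pvAB_eq (l : List (List (String × String))) :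
    calcular_prioridad_mensaje_py l = calcular_prioridad_mensaje_py_alt l := by
  induction l with
  | nil => rfl
  | cons det rest ih => rw [pvA_cons, pvB_cons, ih]

-- ===== VERDICT (by name: the statement is the Claim_ definition above) =====
theorem calcular_prioridad_mensaje_py_spec : Claim_equal_calcular_prioridad_mensaje_py := by
  intro detecciones _
  exact pvAB_eq detecciones
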